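-- pv_equiv track=rewrite | github.com/Mlychen/miniflux-ai | app/application/news_service.py | _dedup_entries
-- ===== SOURCE A (Python) =====
-- def _dedup_entries(entries):
--     seen_ids = set()
--     seen_keys = set()
--     unique = []
--     for entry in entries:
--         entry_id = entry.get("id")
--         if entry_id:
--             if entry_id in seen_ids:
--                 continue
--             seen_ids.add(entry_id)
--             unique.append(entry)
--             continue
--         key = (entry.get("url"), entry.get("title"))
--         if key in seen_keys:
--             continue
--         seen_keys.add(key)
--         unique.append(entry)
--     return unique
-- ===== SOURCE B (Python) =====
-- def _dedup_entries(entries):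
--     def key(entry):
--         entry_id = entry.get("id")
--         if entry_id:
--             return ("id", entry_id)
--         return ("k", entry.get("url"), entry.get("title"))
--
--     first = {}
--     for i, entry in enumerate(entries):
--         k = key(entry)
--         if k not in first:
--             first[k] = i
--     return [entry for i, entry in enumerate(entries) if first[key(entry)] == i]
-- ===== Notes on version B (the rewrite author's own statement) =====
-- stated objective: alternative
-- what changed: Instead of one pass that maintains two seen-sets and appends as it goes, B first builds a map from a discriminated key (id, or url/title when the id is falsy) to its first occurrence index, then keeps exactly the entries whose index equals their key's first index via an enumerate-filter comprehension.
import Mathlib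
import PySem

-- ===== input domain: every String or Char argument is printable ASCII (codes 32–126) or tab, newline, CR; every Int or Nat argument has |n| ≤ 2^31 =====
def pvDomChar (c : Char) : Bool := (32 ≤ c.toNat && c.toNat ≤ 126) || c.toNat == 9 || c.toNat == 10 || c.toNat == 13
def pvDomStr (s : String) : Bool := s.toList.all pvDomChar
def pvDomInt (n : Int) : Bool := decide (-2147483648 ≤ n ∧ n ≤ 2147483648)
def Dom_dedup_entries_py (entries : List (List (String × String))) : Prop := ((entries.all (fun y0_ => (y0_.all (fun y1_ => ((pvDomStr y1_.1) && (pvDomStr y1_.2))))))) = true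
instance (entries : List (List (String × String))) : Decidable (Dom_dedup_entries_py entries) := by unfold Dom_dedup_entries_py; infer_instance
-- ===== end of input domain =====

-- B replaces A's single pass with two seen-sets by a two-pass scheme: build a first-occurrence-index
-- map over a discriminated key, then keep the entries standing at their key's first index (objective: alternative).


-- ===== PORT A =====
-- entry.get(k): first match in the association list (dict semantics)
def pvEGet (e : List (String × String)) (k : String) : Option String :=
  (PySem.Dict.mk e).get? k

-- Python truthiness of entry.get("id"): a present, non-empty string
def pvTruthy (o : Option String) : Bool :=
  match o with
  | some s => s ≠ ""
  | none => false

def dedupA_go (rest : List (List (String × String)))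
    (seenIds : PySem.Set (Option String))
    (seenKeys : PySem.Set (Option String × Option String))
    (unique : List (List (String × String))) : List (List (String × String)) :=
  match rest with
  | [] => unique
  | e :: r =>
    let eid := pvEGet e "id"
    if pvTruthy eid then
      if PySem.Set.contains seenIds eid then dedupA_go r seenIds seenKeys unique
      else dedupA_go r (PySem.Set.add seenIds eid) seenKeys (unique ++ [e])
    else
      let key := (pvEGet e "url", pvEGet e "title")
      if PySem.Set.contains seenKeys key then dedupA_go r seenIds seenKeys unique
      else dedupA_go r seenIds (PySem.Set.add seenKeys key) (unique ++ [e])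

def dedup_entries_py (entries : List (List (String × String))) : List (List (String × String)) :=
  dedupA_go entries PySem.Set.empty PySem.Set.empty []

-- ===== PORT B =====
-- B's discriminated key ("id", id) / ("k", url, title) as a tagged union
abbrev PvKey := String × List (Option String)

def pvKey (e : List (String × String)) : PvKey :=
  let eid := pvEGet e "id"
  if pvTruthy eid then ("id", [eid])
  else ("k", [pvEGet e "url", pvEGet e "title"])

-- first pass: key -> first occurrence index ('if k not in first: first[k] = i')
def pvFirstDict (entries : List (List (String × String))) : PySem.Dict PvKey Int :=
  (PySem.List.enumerate entries).foldl
    (fun d p => if d.contains (pvKey p.2) then d else d.insert (pvKey p.2) p.1)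
    PySem.Dict.empty

-- second pass: the comprehension; 'first[key(entry)] == i' (the key is always present, so get? = some i)
def dedup_entries_py_alt (entries : List (List (String × String))) : List (List (String × String)) :=
  let first := pvFirstDict entries
  ((PySem.List.enumerate entries).filter
    (fun p => first.get? (pvKey p.2) == some p.1)).map (·.2)

-- ===== PRECONDITION & SPEC =====
def Spec_dedup_entries_py (entries : List (List (String × String))) (out : List (List (String × String))) : Prop := out = dedup_entries_py_alt entries
instance (entries : List (List (String × String))) (out : List (List (String × String))) : Decidable (Spec_dedup_entries_py entries out) := by unfold Spec_dedup_entries_py; infer_instance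

-- ===== CLAIM (what is proved, stated in full; the proofs are below) =====
def Claim_equal_dedup_entries_py : Prop := ∀ (entries : List (List (String × String))), Dom_dedup_entries_py entries → Spec_dedup_entries_py entries (dedup_entries_py entries)

-- ===== LEMMAS AND PROOFS =====

-- reference: keep an entry iff its key was not seen before
def pvDed : List (List (String × String)) → List PvKey → List (List (String × String))
  | [], _ => []
  | e :: r, seen =>
    if pvKey e ∈ seen then pvDed r seen else e :: pvDed r (pvKey e :: seen)

theorem pvDed_congr (l : List (List (String × String))) (s₁ s₂ : List PvKey)
    (h : ∀ k, k ∈ s₁ ↔ k ∈ s₂) : pvDed l s₁ = pvDed l s₂ := by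
  induction l generalizing s₁ s₂ with
  | nil => rfl
  | cons e r ih =>
    simp only [pvDed]
    by_cases hm : pvKey e ∈ s₁
    · rw [if_pos hm, if_pos ((h _).1 hm)]; exact ih _ _ h
    · rw [if_neg hm, if_neg (fun hc => hm ((h _).2 hc))]
      exact congrArg _ (ih _ _ (by intro k; simp [h k]))

theorem dedupA_go_eq (rest : List (List (String × String)))
    (seenIds : PySem.Set (Option String))
    (seenKeys : PySem.Set (Option String × Option String))
    (unique : List (List (String × String))) :
    dedupA_go rest seenIds seenKeys unique =
      unique ++ pvDed rest (seenIds.map (fun o => (("id", [o]) : PvKey)) ++ seenKeys.map (fun q => (("k", [q.1, q.2]) : PvKey))) := by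
  induction rest generalizing seenIds seenKeys unique with
  | nil => simp [dedupA_go, pvDed]
  | cons e r ih =>
    simp only [dedupA_go]
    by_cases ht : pvTruthy (pvEGet e "id") = true
    · rw [if_pos ht]
      have hk : pvKey e = (("id", [pvEGet e "id"]) : PvKey) := by simp [pvKey, ht]
      have hmem : pvKey e ∈ (seenIds.map (fun o => (("id", [o]) : PvKey)) ++ seenKeys.map (fun q => (("k", [q.1, q.2]) : PvKey))) ↔ pvEGet e "id" ∈ seenIds := by
        simp [hk, List.mem_append, List.mem_map, Prod.ext_iff]
      by_cases hc : PySem.Set.contains seenIds (pvEGet e "id") = true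
      · rw [if_pos hc, ih]
        have hm := hmem.2 ((PySem.Set.contains_iff _ _).1 hc)
        simp only [pvDed, if_pos hm]
      · have hnm : pvEGet e "id" ∉ seenIds := fun h => hc ((PySem.Set.contains_iff _ _).2 h)
        rw [if_neg hc, ih]
        rw [PySem.Set.add_of_not_mem hnm]
        have hnmS : pvKey e ∉ (seenIds.map (fun o => (("id", [o]) : PvKey)) ++ seenKeys.map (fun q => (("k", [q.1, q.2]) : PvKey))) := fun h => hnm (hmem.1 h)
        simp only [pvDed, if_neg hnmS]
        rw [List.append_assoc]
        congr 1
        simp only [List.cons_append, List.nil_append]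
        congr 1
        apply pvDed_congr
        intro k
        simp only [List.map_append, List.map_cons, List.map_nil, List.mem_append,
          List.mem_cons, List.mem_map, List.not_mem_nil, hk]
        aesop
    · rw [if_neg ht]
      have hk : pvKey e = (("k", [pvEGet e "url", pvEGet e "title"]) : PvKey) := by
        simp [pvKey, ht]
      have hmem : pvKey e ∈ (seenIds.map (fun o => (("id", [o]) : PvKey)) ++ seenKeys.map (fun q => (("k", [q.1, q.2]) : PvKey))) ↔ (pvEGet e "url", pvEGet e "title") ∈ seenKeys := by
        simp [hk, List.mem_append, List.mem_map, Prod.ext_iff]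
      by_cases hc : PySem.Set.contains seenKeys (pvEGet e "url", pvEGet e "title") = true
      · rw [if_pos hc, ih]
        have hm := hmem.2 ((PySem.Set.contains_iff _ _).1 hc)
        simp only [pvDed, if_pos hm]
      · have hnm : (pvEGet e "url", pvEGet e "title") ∉ seenKeys :=
          fun h => hc ((PySem.Set.contains_iff _ _).2 h)
        rw [if_neg hc, ih]
        rw [PySem.Set.add_of_not_mem hnm]
        have hnmS : pvKey e ∉ (seenIds.map (fun o => (("id", [o]) : PvKey)) ++ seenKeys.map (fun q => (("k", [q.1, q.2]) : PvKey))) := fun h => hnm (hmem.1 h)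
        simp only [pvDed, if_neg hnmS]
        rw [List.append_assoc]
        congr 1
        simp only [List.cons_append, List.nil_append]
        congr 1
        apply pvDed_congr
        intro k
        simp only [List.map_append, List.map_cons, List.map_nil, List.mem_append,
          List.mem_cons, List.mem_map, List.not_mem_nil, hk]
        aesop

-- the first pass builds exactly the first-occurrence-index map
theorem pvFirst_fold_get (l : List (List (String × String))) (s : Int)
    (d : PySem.Dict PvKey Int) (k : PvKey) :
    ((PySem.List.enumerate l s).foldl
        (fun d p => if d.contains (pvKey p.2) then d else d.insert (pvKey p.2) p.1) d).get? k =
      match d.get? k with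
      | some v => some v
      | none => (l.findIdx? (fun e => pvKey e == k)).map (fun j => s + (j : Int)) := by
  induction l generalizing s d with
  | nil =>
    simp only [PySem.List.enumerate_nil, List.foldl_nil, List.findIdx?_nil]
    cases d.get? k <;> rfl
  | cons e r ih =>
    rw [PySem.List.enumerate_cons]
    simp only [List.foldl_cons]
    by_cases hc : d.contains (pvKey e) = true
    · rw [if_pos hc, ih]
      cases hg : d.get? k with
      | some v => rfl
      | none =>
        have hne : pvKey e ≠ k := by
          intro h; rw [h] at hc
          rw [(PySem.Dict.get?_eq_none_iff_contains _ _).1 hg] at hc; exact Bool.noConfusion hc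
        rw [List.findIdx?_cons, if_neg (by simp [hne])]
        cases r.findIdx? (fun e => pvKey e == k) with
        | none => simp
        | some j => simp; omega
    · rw [if_neg hc, ih]
      by_cases hk : k = pvKey e
      · subst hk
        rw [PySem.Dict.get?_insert, if_pos rfl,
          (PySem.Dict.get?_eq_none_iff_contains _ _).2 (by simpa using hc)]
        rw [List.findIdx?_cons, if_pos (by simp)]
        simp
      · rw [PySem.Dict.get?_insert, if_neg hk]
        cases hg : d.get? k with
        | some v => rfl
        | none =>
          rw [List.findIdx?_cons, if_neg (by simp [Ne.symm hk])]
          cases r.findIdx? (fun e => pvKey e == k) with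
        | none => simp
        | some j => simp; omega

theorem pvFirstDict_get (full : List (List (String × String))) (k : PvKey) :
    (pvFirstDict full).get? k
      = (full.findIdx? (fun e => pvKey e == k)).map (fun j => (j : Int)) := by
  rw [pvFirstDict, pvFirst_fold_get]
  simp [PySem.Dict.get?_empty]

theorem pvFilterB (full pre l : List (List (String × String))) (h : full = pre ++ l) :
    ((PySem.List.enumerate l (pre.length : Int)).filter
        (fun p => (pvFirstDict full).get? (pvKey p.2) == some p.1)).map (·.2)
      = pvDed l (pre.map pvKey) := by
  induction l generalizing pre with
  | nil => simp [PySem.List.enumerate_nil, pvDed]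
  | cons e r ih =>
    rw [PySem.List.enumerate_cons]
    have hfull : full = (pre ++ [e]) ++ r := by simp [h]
    have hrec := ih (pre ++ [e]) hfull
    simp only [List.length_append, List.length_cons, List.length_nil] at hrec
    push_cast at hrec
    by_cases hm : pvKey e ∈ pre.map pvKey
    · -- seen before: the stored first index is < pre.length, so the entry is dropped
      obtain ⟨x, hx, hkx⟩ := List.mem_map.1 hm
      have hfindPre : ∃ j, pre.findIdx? (fun e' => pvKey e' == pvKey e) = some j ∧ j < pre.length := by
        cases hf : pre.findIdx? (fun e' => pvKey e' == pvKey e) with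
        | none =>
          exact absurd (List.findIdx?_eq_none_iff.1 hf x hx) (by simp [hkx])
        | some j =>
          exact ⟨j, rfl, (List.findIdx?_eq_some_iff_findIdx_eq.1 hf).1⟩
      obtain ⟨j, hj, hjlt⟩ := hfindPre
      have hget : (pvFirstDict full).get? (pvKey e) = some (j : Int) := by
        rw [pvFirstDict_get, h, List.findIdx?_append, hj]; rfl
      have hpred : ((pvFirstDict full).get? (pvKey e) == some ((pre.length : Int))) = false := by
        rw [hget]
        simp only [beq_eq_false_iff_ne, ne_eq, Option.some.injEq]
        intro hEq
        omega
      rw [List.filter_cons]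
      rw [if_neg (by simp [hpred])]
      rw [hrec]
      simp only [pvDed, if_pos hm]
      apply pvDed_congr
      intro k'
      simp only [List.map_append, List.map_cons, List.map_nil, List.mem_append,
        List.mem_cons, List.not_mem_nil, or_false]
      constructor
      · rintro (hk' | hk')
        · exact hk'
        · rw [hk']; exact hm
      · intro hk'; exact Or.inl hk'
    · -- first occurrence: stored index equals this position, the entry is kept
      have hfindPre : pre.findIdx? (fun e' => pvKey e' == pvKey e) = none := by
        rw [List.findIdx?_eq_none_iff]
        intro x hx
        simp only [beq_eq_false_iff_ne, ne_eq]
        intro hEq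
        exact hm (List.mem_map.2 ⟨x, hx, hEq⟩)
      have hget : (pvFirstDict full).get? (pvKey e) = some ((pre.length : Int)) := by
        rw [pvFirstDict_get, h, List.findIdx?_append, hfindPre, List.findIdx?_cons,
          if_pos (by simp)]
        simp
      rw [List.filter_cons]
      rw [if_pos (by simp [hget])]
      rw [List.map_cons]
      rw [hrec]
      simp only [pvDed, if_neg hm]
      congr 1
      apply pvDed_congr
      intro k'
      simp only [List.map_append, List.map_cons, List.map_nil, List.mem_append,
        List.mem_cons, List.not_mem_nil, or_false]
      tauto

theorem dedupB_eq (entries : List (List (String × String))) :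
    dedup_entries_py_alt entries = pvDed entries [] := by
  have := pvFilterB entries [] entries rfl
  simpa [dedup_entries_py_alt] using this

-- ===== VERDICT (by name: the statement is the Claim_ definition above) =====
theorem dedup_entries_py_spec : Claim_equal_dedup_entries_py := by
  intro entries _
  unfold Spec_dedup_entries_py
  rw [dedupB_eq]
  have := dedupA_go_eq entries PySem.Set.empty PySem.Set.empty []
  simpa [dedup_entries_py, PySem.Set.empty] using this
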